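-- pv_equiv track=rewrite | github.com/Artin-khodayari/DAMAVAND-lang | ide.py | _find_string_spans
-- ===== SOURCE A (Python) =====
-- def _find_string_spans(text):
--     spans = []
--     i, n = 0, len(text)
--     in_str = False
--     quote = None
--     start = 0
--     while i < n:
--         c = text[i]
--         if not in_str:
--             if c in ("'", '"'):
--                 in_str = True
--                 quote = c
--                 start = i
--             i += 1
--         else:
--             if c == "\\":
--                 i += 2  # skip escaped char
--                 continue
--             if c == quote:
--                 spans.append((start, i + 1))  # include closing quote
--                 in_str = False
--                 quote = None
--                 i += 1
--             else:
--                 i += 1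
--     # unclosed string: color until EOL or end
--     if in_str:
--         spans.append((start, n))
--     return spans
-- ===== SOURCE B (Python) =====
-- import re
--
-- # One regex over the whole text: opening quote (backreference), then greedily
-- # escape-pairs or non-quote chars, closed by the same quote or end of string.
-- _STRING_RE = re.compile(r"(['\"])(?:\\.|(?!\1).)*(?:\1|\Z)", re.DOTALL)
--
-- def _find_string_spans(text):
--     return [m.span() for m in _STRING_RE.finditer(text)]
-- ===== Notes on version B (the rewrite author's own statement) =====
-- stated objective: idiomatic
-- what changed: Replaces the explicit in_str/quote/start while-loop state machine with one compiled DOTALL regex (opening quote as backreference, greedy escape-pair/non-quote repetition, closing quote or end of string) iterated with re.finditer, collecting m.span(); same O(n) scan but the matching runs in the C regex engine (measured ~10x at the largest size).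
import Mathlib
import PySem

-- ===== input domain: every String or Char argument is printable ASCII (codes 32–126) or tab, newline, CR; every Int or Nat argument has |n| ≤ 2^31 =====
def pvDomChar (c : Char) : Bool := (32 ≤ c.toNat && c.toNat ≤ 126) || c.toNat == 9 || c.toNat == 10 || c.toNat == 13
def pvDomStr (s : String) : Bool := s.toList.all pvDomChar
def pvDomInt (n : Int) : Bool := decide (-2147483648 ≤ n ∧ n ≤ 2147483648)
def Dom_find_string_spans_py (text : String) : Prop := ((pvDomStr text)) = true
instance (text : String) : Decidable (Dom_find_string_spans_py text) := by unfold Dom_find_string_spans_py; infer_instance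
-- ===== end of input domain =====

-- B replaces A's explicit in_str/quote/start state machine by one regex scan
-- (finditer of an opening quote, greedily escape-pairs or non-quote chars, a
-- matching quote or end of string); objective: idiomatic, same spans.

-- ===== PORT A =====
-- A's while loop: index i, in_str/quote/start state; `rest` is the suffix of the
-- characters from index i, n = len(text); terminates since rest shrinks.
def pvLoopA (n : Nat) (rest : List Char) (i : Nat) (in_str : Bool)
    (quote : Option Char) (start : Nat) (spans : List (Int × Int)) : List (Int × Int) :=
  match rest with
  | [] => if in_str then spans ++ [((start : Int), (n : Int))] else spans
  | c :: rt =>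
    if !in_str then
      if c = '\'' ∨ c = '"' then
        pvLoopA n rt (i + 1) true (some c) i spans
      else
        pvLoopA n rt (i + 1) false quote start spans
    else
      if c = '\\' then
        -- i += 2; continue  (skip escaped char)
        pvLoopA n (rt.drop 1) (i + 2) in_str quote start spans
      else if some c = quote then
        pvLoopA n rt (i + 1) false none start (spans ++ [((start : Int), ((i : Int) + 1))])
      else
        pvLoopA n rt (i + 1) in_str quote start spans
termination_by rest.length
decreasing_by all_goals simp

def find_string_spans_py (text : String) : List (Int × Int) :=
  pvLoopA text.toList.length text.toList 0 false none 0 []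

-- ===== PORT B =====
-- Hand port of the regex (['\"])(?:\\.|(?!\1).)*(?:\1|\Z) with DOTALL, exact for
-- this pattern: pvMatchEnd computes the (greedy, never-backtracking) match end
-- for a match opened by quote q at index j-1; pvFindIter is re.finditer, which
-- resumes the scan at each match's end.
def pvMatchEnd (q : Char) (rest : List Char) (j : Nat) : Nat :=
  match rest with
  | [] => j                                   -- \Z alternative
  | c :: rt =>
    if c = '\\' then
      match rt with
      | [] => j + 1                           -- lone final backslash: '.' then \Z
      | _ :: rt2 => pvMatchEnd q rt2 (j + 2)  -- '\\.' consumes the pair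
    else if c = q then j + 1                  -- closing quote
    else pvMatchEnd q rt (j + 1)              -- '(?!\1).' consumes one char

def pvFindIter (rest : List Char) (i : Nat) (acc : List (Int × Int)) : List (Int × Int) :=
  match rest with
  | [] => acc
  | c :: rt =>
    if c = '\'' ∨ c = '"' then
      let e := pvMatchEnd c rt (i + 1)
      pvFindIter (rt.drop (e - (i + 1))) e (acc ++ [((i : Int), (e : Int))])
    else
      pvFindIter rt (i + 1) acc
termination_by rest.length
decreasing_by all_goals simp

def find_string_spans_py_alt (text : String) : List (Int × Int) :=
  pvFindIter text.toList 0 []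

-- ===== PRECONDITION & SPEC =====
def Spec_find_string_spans_py (text : String) (out : List (Int × Int)) : Prop := out = find_string_spans_py_alt text
instance (text : String) (out : List (Int × Int)) : Decidable (Spec_find_string_spans_py text out) := by unfold Spec_find_string_spans_py; infer_instance

-- ===== CLAIM (what is proved, stated in full; the proofs are below) =====
def Claim_equal_find_string_spans_py : Prop := ∀ (text : String), Dom_find_string_spans_py text → Spec_find_string_spans_py text (find_string_spans_py text)

-- ===== LEMMAS AND PROOFS =====

-- `pvClose q rest = some (k, r)`: the string opened by quote q closes after
-- consuming k chars of rest, leaving r; `none`: it never closes.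
def pvClose (q : Char) (rest : List Char) : Option (Nat × List Char) :=
  match rest with
  | [] => none
  | c :: rt =>
    if c = '\\' then
      match rt with
      | [] => none
      | _ :: rt2 => (pvClose q rt2).map (fun p => (p.1 + 2, p.2))
    else if c = q then some (1, rt)
    else (pvClose q rt).map (fun p => (p.1 + 1, p.2))

theorem pvClose_spec (q : Char) : ∀ (rest : List Char) (k : Nat) (r : List Char),
    pvClose q rest = some (k, r) →
    1 ≤ k ∧ k ≤ rest.length ∧ rest.drop k = r ∧ (∀ j, pvMatchEnd q rest j = j + k)
  | [] => by intro k r h; simp [pvClose] at h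
  | c :: rt => by
    intro k r h
    rw [pvClose.eq_def] at h
    by_cases hb : c = '\\'
    · match rt, h with
      | [], h => simp [hb] at h
      | x :: rt2, h =>
        simp only [hb, reduceIte] at h
        obtain ⟨⟨k', r'⟩, hcl, hkr⟩ := Option.map_eq_some_iff.mp h
        obtain ⟨hk, hr⟩ : k' + 2 = k ∧ r' = r := Prod.mk.injEq .. ▸ hkr
        obtain ⟨h1, h2, h3, h4⟩ := pvClose_spec q rt2 k' r' hcl
        subst hk hr
        refine ⟨by omega, by simp; omega, ?_, ?_⟩
        · rw [show k' + 2 = k' + 1 + 1 by omega, List.drop_succ_cons, List.drop_succ_cons]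
          exact h3
        · intro j; rw [pvMatchEnd.eq_def]; simp [hb, h4]; omega
    · by_cases hq : c = q
      · subst hq
        simp only [hb, reduceIte, Option.some.injEq] at h
        obtain ⟨hk, hr⟩ : 1 = k ∧ rt = r := Prod.mk.injEq .. ▸ h
        subst hk hr
        refine ⟨le_refl _, by simp, by simp, ?_⟩
        intro j; rw [pvMatchEnd.eq_def]; simp [hb]
      · simp only [hb, hq, reduceIte] at h
        obtain ⟨⟨k', r'⟩, hcl, hkr⟩ := Option.map_eq_some_iff.mp h
        obtain ⟨hk, hr⟩ : k' + 1 = k ∧ r' = r := Prod.mk.injEq .. ▸ hkr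
        obtain ⟨h1, h2, h3, h4⟩ := pvClose_spec q rt k' r' hcl
        subst hk hr
        refine ⟨by omega, by simp; omega, ?_, ?_⟩
        · rw [List.drop_succ_cons]; exact h3
        · intro j; rw [pvMatchEnd.eq_def]; simp [hb, hq, h4]; omega
termination_by rest => rest.length

theorem pvClose_none (q : Char) : ∀ (rest : List Char),
    pvClose q rest = none → (∀ j, pvMatchEnd q rest j = j + rest.length)
  | [] => by intro _ j; simp [pvMatchEnd]
  | c :: rt => by
    intro h j
    rw [pvClose.eq_def] at h
    rw [pvMatchEnd.eq_def]
    by_cases hb : c = '\\'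
    · match rt, h with
      | [], h => simp [hb]
      | x :: rt2, h =>
        simp only [hb, reduceIte] at h
        have hcl : pvClose q rt2 = none := by
          cases hcl2 : pvClose q rt2 with
          | none => rfl
          | some p => rw [hcl2] at h; simp at h
        simp [hb, pvClose_none q rt2 hcl]
        omega
    · by_cases hq : c = q
      · subst hq; simp [hb] at h
      · simp only [hb, hq, reduceIte] at h
        have hcl : pvClose q rt = none := by
          cases hcl2 : pvClose q rt with
          | none => rfl
          | some p => rw [hcl2] at h; simp at h
        simp [hb, hq, pvClose_none q rt hcl]
        omega
termination_by rest => rest.length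

theorem pvLoopA_instr (q : Char) (n : Nat) : ∀ (rest : List Char) (j start : Nat)
    (spans : List (Int × Int)),
    pvLoopA n rest j true (some q) start spans =
      match pvClose q rest with
      | some (k, r) => pvLoopA n r (j + k) false none start (spans ++ [((start : Int), ((j + k : Nat) : Int))])
      | none => spans ++ [((start : Int), (n : Int))]
  | [] => by intro j start spans; simp [pvLoopA, pvClose]
  | c :: rt => by
    intro j start spans
    rw [pvLoopA.eq_def, pvClose.eq_def]
    by_cases hb : c = '\\'
    · simp only [hb, reduceIte, Bool.not_true, Bool.false_eq_true, if_false]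
      match rt with
      | [] => simp [pvLoopA]
      | x :: rt2 =>
        simp only [List.drop_succ_cons, List.drop_zero]
        rw [pvLoopA_instr q n rt2 (j + 2) start spans]
        cases hcl : pvClose q rt2 with
        | none => simp
        | some p =>
          obtain ⟨k', r'⟩ := p
          simp only [Option.map_some]
          rw [show j + 2 + k' = j + (k' + 2) by omega]
    · by_cases hq : c = q
      · subst hq
        simp only [hb, reduceIte, Bool.not_true, Bool.false_eq_true, if_false]
        rw [show ((j : Int) + 1) = ((j + 1 : Nat) : Int) by push_cast; ring]
      · have hq' : ¬ some c = some q := by simp [hq]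
        simp only [hb, hq, hq', Bool.not_true, Bool.false_eq_true, if_false]
        rw [pvLoopA_instr q n rt (j + 1) start spans]
        cases hcl : pvClose q rt with
        | none => simp
        | some p =>
          obtain ⟨k', r'⟩ := p
          simp only [Option.map_some]
          rw [show j + 1 + k' = j + (k' + 1) by omega]
termination_by rest => rest.length

theorem pvMain (n : Nat) : ∀ (rest : List Char) (i : Nat) (q : Option Char) (start : Nat)
    (spans : List (Int × Int)), i + rest.length = n →
    pvLoopA n rest i false q start spans = pvFindIter rest i spans
  | [] => by intro i q start spans _; simp [pvLoopA, pvFindIter]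
  | c :: rt => by
    intro i q start spans hinv
    rw [pvLoopA.eq_def, pvFindIter.eq_def]
    by_cases hc : c = '\'' ∨ c = '"'
    · simp only [hc, Bool.not_false, if_pos]
      rw [pvLoopA_instr c n rt (i + 1) i spans]
      cases hcl : pvClose c rt with
      | some p =>
        obtain ⟨k, r⟩ := p
        obtain ⟨h1, h2, h3, h4⟩ := pvClose_spec c rt k r hcl
        have hlen : k + r.length = rt.length := by
          have := congrArg List.length h3; simp at this; omega
        simp only [h4, show i + 1 + k - (i + 1) = k by omega, h3]
        exact pvMain n r (i + 1 + k) none i (spans ++ [((i : Int), ((i + 1 + k : Nat) : Int))])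
          (by simp at hinv ⊢; omega)
      | none =>
        have h4 := pvClose_none c rt hcl
        simp only [h4]
        have he : i + 1 + rt.length = n := by simp at hinv; omega
        rw [show i + 1 + rt.length - (i + 1) = rt.length by omega, List.drop_length]
        rw [pvFindIter.eq_def]
        simp [he]
    · have hc' : ¬ (c = '\'' ∨ c = '"') := hc
      simp only [hc', reduceIte, Bool.not_false, if_true]
      exact pvMain n rt (i + 1) q start spans (by simp at hinv ⊢; omega)
termination_by rest => rest.length
decreasing_by
  · simp; omega
  · simp
-- ===== VERDICT (by name: the statement is the Claim_ definition above) =====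
theorem find_string_spans_py_spec : Claim_equal_find_string_spans_py := by
  intro text _
  unfold Spec_find_string_spans_py find_string_spans_py find_string_spans_py_alt
  exact pvMain text.toList.length text.toList 0 none 0 [] (by simp)
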